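-- pv_equiv track=rewrite | github.com/thealper2/codewars-solutions | 7-kyu/coin_co_operation.py | get_coin_balances
-- ===== SOURCE A (Python) =====
-- def get_coin_balances(lst1, lst2):
--     p1 = 3
--     p2 = 3
--     for l1, l2 in zip(lst1, lst2):
--         if l1 == 'share' and l2 == 'share':
--             p1 += 2
--             p2 += 2
--         elif l1 == 'steal' and l2 == 'share':
--             p1 += 3
--             p2 -= 1
--         elif l1 == 'share' and l2 == 'steal':
--             p1 -= 1
--             p2 += 3
--
--     return (p1, p2)
-- ===== SOURCE B (Python) =====
-- def get_coin_balances(lst1, lst2):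
--     pairs = list(zip(lst1, lst2))
--     a = pairs.count(('share', 'share'))
--     b = pairs.count(('steal', 'share'))
--     c = pairs.count(('share', 'steal'))
--     return (3 + 2 * a + 3 * b - c, 3 + 2 * a - b + 3 * c)
-- ===== Notes on version B (the rewrite author's own statement) =====
-- stated objective: alternative
-- what changed: Replaces per-element if/elif accumulation of (p1,p2) by tallying the three pair types with list.count over zip(lst1,lst2) and computing both balances with one closed-form arithmetic expression.
import Mathlib
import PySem

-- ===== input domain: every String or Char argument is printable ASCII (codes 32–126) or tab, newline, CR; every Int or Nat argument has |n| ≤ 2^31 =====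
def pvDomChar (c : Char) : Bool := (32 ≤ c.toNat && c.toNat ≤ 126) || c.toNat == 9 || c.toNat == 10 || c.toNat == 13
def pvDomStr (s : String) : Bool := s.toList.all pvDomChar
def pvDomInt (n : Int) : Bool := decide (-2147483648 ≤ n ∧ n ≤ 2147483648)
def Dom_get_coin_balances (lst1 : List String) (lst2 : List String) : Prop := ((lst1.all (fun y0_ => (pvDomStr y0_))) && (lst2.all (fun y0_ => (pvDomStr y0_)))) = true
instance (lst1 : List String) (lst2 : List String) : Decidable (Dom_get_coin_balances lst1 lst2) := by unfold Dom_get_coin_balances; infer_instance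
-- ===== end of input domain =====

-- ===== PORT A =====
-- A: fold over zip with the if/elif ladder, per-element accumulation of (p1, p2)
def gcbStep (p : Int × Int) (x : String × String) : Int × Int :=
  if x.1 == "share" && x.2 == "share" then (p.1 + 2, p.2 + 2)
  else if x.1 == "steal" && x.2 == "share" then (p.1 + 3, p.2 - 1)
  else if x.1 == "share" && x.2 == "steal" then (p.1 - 1, p.2 + 3)
  else p

def get_coin_balances (lst1 : List String) (lst2 : List String) : Int × Int :=
  (lst1.zip lst2).foldl gcbStep (3, 3)

-- ===== PORT B =====
-- B: tally the three pair types over zip, then closed-form arithmetic (alternative decomposition)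
def get_coin_balances_alt (lst1 : List String) (lst2 : List String) : Int × Int :=
  let pairs := lst1.zip lst2
  let a : Int := PySem.List.count pairs ("share", "share")
  let b : Int := PySem.List.count pairs ("steal", "share")
  let c : Int := PySem.List.count pairs ("share", "steal")
  (3 + 2 * a + 3 * b - c, 3 + 2 * a - b + 3 * c)

-- ===== PRECONDITION & SPEC =====
def Spec_get_coin_balances (lst1 : List String) (lst2 : List String) (out : Int × Int) : Prop := out = get_coin_balances_alt lst1 lst2
instance (lst1 : List String) (lst2 : List String) (out : Int × Int) : Decidable (Spec_get_coin_balances lst1 lst2 out) := by unfold Spec_get_coin_balances; infer_instance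

-- ===== CLAIM (what is proved, stated in full; the proofs are below) =====
def Claim_equal_get_coin_balances : Prop := ∀ (lst1 : List String) (lst2 : List String), Dom_get_coin_balances lst1 lst2 → Spec_get_coin_balances lst1 lst2 (get_coin_balances lst1 lst2)

-- ===== LEMMAS AND PROOFS =====

-- ===== VERDICT (by name: the statement is the Claim_ definition above) =====
lemma gcbStep_other (p : Int × Int) (x : String × String)
    (h1 : x ≠ ("share", "share")) (h2 : x ≠ ("steal", "share")) (h3 : x ≠ ("share", "steal")) :
    gcbStep p x = p := by
  cases x with
  | mk u v =>
    have b1 : (u == "share" && v == "share") = false := by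
      simp_all [Prod.ext_iff]
    have b2 : (u == "steal" && v == "share") = false := by
      simp_all [Prod.ext_iff]
    have b3 : (u == "share" && v == "steal") = false := by
      simp_all [Prod.ext_iff]
    simp [gcbStep, b1, b2, b3]

lemma gcb_fold (ps : List (String × String)) : ∀ (p1 p2 : Int),
    ps.foldl gcbStep (p1, p2)
    = (p1 + 2 * (ps.count ("share", "share") : Int) + 3 * (ps.count ("steal", "share") : Int)
          - (ps.count ("share", "steal") : Int),
       p2 + 2 * (ps.count ("share", "share") : Int) - (ps.count ("steal", "share") : Int)
          + 3 * (ps.count ("share", "steal") : Int)) := by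
  induction ps with
  | nil => intro p1 p2; simp
  | cons hd tl ih =>
    intro p1 p2
    rw [List.foldl_cons]
    by_cases h1 : hd = ("share", "share")
    · subst h1
      rw [show gcbStep (p1, p2) ("share", "share") = (p1 + 2, p2 + 2) from rfl, ih]
      simp [Prod.ext_iff]; constructor <;> ring
    · by_cases h2 : hd = ("steal", "share")
      · subst h2
        rw [show gcbStep (p1, p2) ("steal", "share") = (p1 + 3, p2 - 1) from rfl, ih]
        simp [h1, Prod.ext_iff]; constructor <;> ring
      · by_cases h3 : hd = ("share", "steal")
        · subst h3
          rw [show gcbStep (p1, p2) ("share", "steal") = (p1 - 1, p2 + 3) from rfl, ih]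
          simp [h1, h2, Prod.ext_iff]; constructor <;> ring
        · rw [gcbStep_other _ _ h1 h2 h3, ih]
          simp [h1, h2, h3]

-- ===== VERDICT (by name: the statement is the Claim_ definition above) =====
theorem get_coin_balances_spec : Claim_equal_get_coin_balances := by
  intro lst1 lst2 _
  unfold Spec_get_coin_balances get_coin_balances get_coin_balances_alt
  rw [gcb_fold]
  simp [PySem.List.count]
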